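-- pv_equiv track=rewrite | github.com/ssvanda/ECE-Data-Science | homework-8-f21-ssvanda-master/hw8_1.py | dict_union
-- ===== SOURCE A (Python) =====
-- def dict_union(list_of_dicts):
--     union_ngrams = []
--     dictsSet = set()
--     # iterate, var k is the actual dictionary
--     # k.key() returns all keys within dictionary
--     # returns a dict_keys object, contains a list of keys, need to cast to list
--     # update method on set needs an actual list
--     for dict in list_of_dicts:
--         dictsSet.update(list(dict.keys()))
--         # use set update
--     # s
--     union_ngrams = list(dictsSet)
--     union_ngrams = sorted(union_ngrams)
--
--
--     return union_ngrams
-- ===== SOURCE B (Python) =====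
-- def dict_union(list_of_dicts):
--     all_keys = []
--     for d in list_of_dicts:
--         all_keys.extend(d.keys())
--     all_keys = sorted(all_keys)
--     result = []
--     for k in all_keys:
--         if not result or result[-1] != k:
--             result.append(k)
--     return result
-- ===== Notes on version B (the rewrite author's own statement) =====
-- stated objective: alternative
-- what changed: Instead of accumulating keys into a set and sorting the set, B concatenates all keys (with duplicates) into one flat list, sorts it once, and removes duplicates in a single linear pass by skipping elements equal to the last emitted one.
import Mathlib
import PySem

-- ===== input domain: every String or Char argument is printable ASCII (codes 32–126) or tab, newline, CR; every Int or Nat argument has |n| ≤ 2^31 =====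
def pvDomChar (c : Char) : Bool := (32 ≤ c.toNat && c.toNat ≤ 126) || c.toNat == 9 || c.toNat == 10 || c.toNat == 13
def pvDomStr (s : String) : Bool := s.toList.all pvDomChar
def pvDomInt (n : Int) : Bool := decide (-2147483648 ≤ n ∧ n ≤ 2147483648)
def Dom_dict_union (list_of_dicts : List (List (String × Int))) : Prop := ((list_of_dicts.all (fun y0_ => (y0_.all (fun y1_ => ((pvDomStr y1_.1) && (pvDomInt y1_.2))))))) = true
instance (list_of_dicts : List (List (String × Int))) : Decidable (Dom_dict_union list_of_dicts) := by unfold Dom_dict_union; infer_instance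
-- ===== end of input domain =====

-- B replaces A's set accumulation by: concatenate all keys, sort once, then one linear
-- adjacent-dedup pass; an alternative of the same cost (objective: alternative).


-- ===== PORT A =====
-- dict.keys() on an association list: keys in first-occurrence order
def pvKeys (d : List (String × Int)) : List String := PySem.List.dedup (d.map Prod.fst)

def dict_union (list_of_dicts : List (List (String × Int))) : List String :=
  -- dictsSet = set(); for dict in list_of_dicts: dictsSet.update(list(dict.keys()))
  let dictsSet : PySem.Set String :=
    list_of_dicts.foldl (fun s d => PySem.Set.update s (pvKeys d)) PySem.Set.empty
  -- union_ngrams = sorted(list(dictsSet))  (sorted w/o key: result independent of set order)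
  PySem.List.sorted dictsSet (fun x => x) false

-- ===== PORT B =====
def dict_union_alt (list_of_dicts : List (List (String × Int))) : List String :=
  -- all_keys = []; for d in list_of_dicts: all_keys.extend(d.keys())
  let all_keys := list_of_dicts.foldl (fun acc d => acc ++ pvKeys d) []
  -- all_keys = sorted(all_keys)
  let sorted_keys := PySem.List.sorted all_keys (fun x => x) false
  -- result = []; for k in sorted_keys: if not result or result[-1] != k: result.append(k)
  sorted_keys.foldl
    (fun result k =>
      if result = [] ∨ result.getLast? ≠ some k then result ++ [k] else result) []

-- ===== PRECONDITION & SPEC =====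
def Spec_dict_union (list_of_dicts : List (List (String × Int))) (out : List String) : Prop := out = dict_union_alt list_of_dicts
instance (list_of_dicts : List (List (String × Int))) (out : List String) : Decidable (Spec_dict_union list_of_dicts out) := by unfold Spec_dict_union; infer_instance

-- ===== CLAIM (what is proved, stated in full; the proofs are below) =====
def Claim_equal_dict_union : Prop := ∀ (list_of_dicts : List (List (String × Int))), Dom_dict_union list_of_dicts → Spec_dict_union list_of_dicts (dict_union list_of_dicts)

-- ===== LEMMAS AND PROOFS =====

-- A's set-update loop builds set(flatten of all key lists)
theorem foldl_update_eq_ofList_flatMap (L : List (List (String × Int))) :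
    L.foldl (fun s d => PySem.Set.update s (pvKeys d)) PySem.Set.empty
      = PySem.Set.ofList (L.flatMap pvKeys) := by
  suffices h : ∀ (L : List (List (String × Int))) (s : List String),
      L.foldl (fun s d => PySem.Set.update s (pvKeys d)) s
        = (L.flatMap pvKeys).foldl PySem.Set.add s by
    simpa [PySem.Set.ofList_eq_foldl, PySem.Set.empty] using h L []
  intro L
  induction L with
  | nil => intro s; simp
  | cons d L ih =>
      intro s
      rw [List.foldl_cons, ih, PySem.Set.update]
      simp [List.flatMap_cons, List.foldl_append]

-- the adjacent-dedup foldl is List.destutter (· ≠ ·)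
theorem foldl_dedup_eq_destutter (T : List String) :
    T.foldl (fun result k =>
        if result = [] ∨ result.getLast? ≠ some k then result ++ [k] else result) []
      = T.destutter (· ≠ ·) := by
  suffices h : ∀ (T res : List String) (a : String),
      T.foldl (fun result k =>
          if result = [] ∨ result.getLast? ≠ some k then result ++ [k] else result) (res ++ [a])
        = res ++ List.destutter' (· ≠ ·) a T by
    cases T with
    | nil => rfl
    | cons a T =>
        have := h T [] a
        simpa [List.foldl_cons, List.destutter] using this
  intro T
  induction T with
  | nil => intro res a; simp [List.destutter']
  | cons b T ih =>
      intro res a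
      by_cases hab : a = b
      · subst hab
        rw [List.foldl_cons, if_neg (by simp), List.destutter', if_neg (by simp)]
        exact ih res a
      · rw [List.foldl_cons, if_pos (by simp [hab]), List.destutter',
            if_pos (by simpa using hab)]
        have := ih (res ++ [a]) b
        simpa [List.append_assoc] using this

-- destutter never loses membership: each dropped element equals its kept predecessor
theorem mem_destutter' (T : List String) :
    ∀ (a x : String), x ∈ a :: T → x ∈ List.destutter' (· ≠ ·) a T := by
  induction T with
  | nil => intro a x hx; simpa [List.destutter'] using hx
  | cons b T ih =>
      intro a x hx
      by_cases hab : a = b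
      · subst hab
        rw [List.destutter', if_neg (by simp)]
        rcases List.mem_cons.mp hx with h | h
        · exact ih a x (by simp [h])
        · exact ih a x h
      · rw [List.destutter', if_pos (by simpa using hab)]
        rcases List.mem_cons.mp hx with h | h
        · simp [h]
        · exact List.mem_cons_of_mem _ (ih b x h)

-- on a ≤-sorted list, destutter (· ≠ ·) is strictly increasing
theorem destutter'_pairwise_lt (T : List String) :
    ∀ (a : String), (a :: T).Pairwise (· ≤ ·) →
      (List.destutter' (· ≠ ·) a T).Pairwise (· < ·) := by
  induction T with
  | nil => intro a _; simp [List.destutter']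
  | cons b T ih =>
      intro a hp
      have hab : a ≤ b := (List.pairwise_cons.mp hp).1 b (by simp)
      have hbT : (b :: T).Pairwise (· ≤ ·) := (List.pairwise_cons.mp hp).2
      by_cases heq : a = b
      · subst heq
        rw [List.destutter', if_neg (by simp)]
        exact ih a hbT
      · rw [List.destutter', if_pos (by simpa using heq)]
        refine List.pairwise_cons.mpr ⟨?_, ih b hbT⟩
        intro x hx
        have hxmem : x ∈ b :: T :=
          (List.destutter'_sublist (l := T) (R := (· ≠ ·)) (a := b)).subset hx
        have halt : a < b := lt_of_le_of_ne hab heq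
        rcases List.mem_cons.mp hxmem with h | h
        · exact h ▸ halt
        · exact lt_of_lt_of_le halt ((List.pairwise_cons.mp hbT).1 x h)

theorem destutter_pairwise_lt (T : List String) (h : T.Pairwise (· ≤ ·)) :
    (T.destutter (· ≠ ·)).Pairwise (· < ·) := by
  cases T with
  | nil => simp [List.destutter]
  | cons a T' => exact destutter'_pairwise_lt T' a h

theorem mem_destutter_of_mem (T : List String) (x : String) (h : x ∈ T) :
    x ∈ T.destutter (· ≠ ·) := by
  cases T with
  | nil => simp at h
  | cons a T' => exact mem_destutter' T' a x h

theorem destutter_sorted_eq_sorted_ofList (xs : List String) :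
    PySem.List.sorted (PySem.Set.ofList xs) (fun x => x) false
      = (PySem.List.sorted xs (fun x => x) false).destutter (· ≠ ·) := by
  have hTle : (PySem.List.sorted xs (fun x => x) false).Pairwise (· ≤ ·) :=
    PySem.List.sorted_pairwise xs (fun x => x)
  have hlt : ((PySem.List.sorted xs (fun x => x) false).destutter (· ≠ ·)).Pairwise (· < ·) :=
    destutter_pairwise_lt _ hTle
  have hmem : ∀ x, x ∈ (PySem.List.sorted xs (fun x => x) false).destutter (· ≠ ·)
      ↔ x ∈ PySem.Set.ofList xs := by
    intro x
    constructor
    · intro hx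
      have h1 : x ∈ PySem.List.sorted xs (fun x => x) false :=
        (List.destutter_sublist _ _).subset hx
      exact (PySem.Set.mem_ofList xs x).mpr ((PySem.List.mem_sorted xs _ false x).mp h1)
    · intro hx
      exact mem_destutter_of_mem _ x
        ((PySem.List.mem_sorted xs _ false x).mpr ((PySem.Set.mem_ofList xs x).mp hx))
  have hnodupD : ((PySem.List.sorted xs (fun x => x) false).destutter (· ≠ ·)).Nodup :=
    hlt.imp (fun h => ne_of_lt h)
  have hperm : ((PySem.List.sorted xs (fun x => x) false).destutter (· ≠ ·)).Perm
      (PySem.Set.ofList xs) := by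
    rw [List.perm_ext_iff_of_nodup hnodupD (PySem.Set.nodup_ofList xs)]
    exact hmem
  exact PySem.List.sorted_eq_of_perm_of_pairwise_lt _ _ _ hperm hlt

-- ===== VERDICT (by name: the statement is the Claim_ definition above) =====
theorem dict_union_spec : Claim_equal_dict_union := by
  intro L _
  unfold Spec_dict_union dict_union dict_union_alt
  rw [foldl_update_eq_ofList_flatMap, PySem.List.foldl_append_eq_flatMap,
      foldl_dedup_eq_destutter, destutter_sorted_eq_sorted_ofList, List.nil_append]
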